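-- pv_equiv track=rewrite | github.com/KrithikK7/Audio_watermarking | detect/detect.py | bits_to_frames
-- ===== SOURCE A (Python) =====
-- from typing import List, Tuple
--
-- def bits_to_frames(bits: List[int], width: int = 16) -> List[List[int]]:
--     out = []
--     i = 0
--     while i < len(bits):
--         chunk = bits[i:i+width]
--         if len(chunk) < width:
--             chunk += [0] * (width - len(chunk))
--         out.append(chunk)
--         i += width
--     return out
-- ===== SOURCE B (Python) =====
-- def bits_to_frames(bits, width=16):
--     out = []
--     cur = []
--     for b in bits:
--         cur.append(b)
--         if len(cur) == width:
--             out.append(cur)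
--             cur = []
--     if cur:
--         out.append(cur + [0] * (width - len(cur)))
--     return out
-- ===== Notes on version B (the rewrite author's own statement) =====
-- stated objective: alternative
-- what changed: B streams the bits one element at a time into an accumulator frame, flushing each frame when it fills and padding only the leftover frame at the end, instead of A's index-stepping while loop that slices bits[i:i+width] and pads inside the loop.
import Mathlib
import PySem

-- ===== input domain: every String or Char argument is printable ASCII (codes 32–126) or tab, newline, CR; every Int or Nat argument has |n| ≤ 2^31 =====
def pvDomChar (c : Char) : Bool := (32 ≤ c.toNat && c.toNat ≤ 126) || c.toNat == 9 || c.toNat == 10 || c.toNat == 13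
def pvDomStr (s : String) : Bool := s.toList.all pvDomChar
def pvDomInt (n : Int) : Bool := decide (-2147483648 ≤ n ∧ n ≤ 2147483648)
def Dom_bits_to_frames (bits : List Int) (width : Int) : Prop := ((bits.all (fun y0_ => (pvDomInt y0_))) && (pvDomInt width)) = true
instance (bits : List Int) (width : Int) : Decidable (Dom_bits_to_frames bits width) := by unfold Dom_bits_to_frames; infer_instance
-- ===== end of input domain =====

-- B streams the bits one element at a time into an accumulator frame, flushing each
-- frame when it fills and padding only the leftover frame at the end, instead of A's
-- index-stepping while loop that slices bits[i:i+width] and pads inside the loop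
-- (objective: alternative traversal, same cost).

-- ===== PORT A =====
-- A's while loop, fuel-bounded: bits.length + 1 iterations suffice whenever width ≥ 1
-- (each step advances i by width ≥ 1 while i < len); for width ≤ 0 with nonempty bits
-- the Python loop never terminates, which Pre_ excludes.
def bitsLoopA (bits : List Int) (width : Int) : Nat → Int → List (List Int)
  | 0, _ => []
  | fuel + 1, i =>
    if i < (bits.length : Int) then
      let chunk := PySem.List.slice bits (some i) (some (i + width))
      let chunk :=
        if (chunk.length : Int) < width then
          chunk ++ List.replicate (width - (chunk.length : Int)).toNat 0
        else chunk
      chunk :: bitsLoopA bits width fuel (i + width)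
    else []

def bits_to_frames (bits : List Int) (width : Int) : List (List Int) :=
  bitsLoopA bits width (bits.length + 1) 0

-- ===== PORT B =====
-- B's for loop over the elements: state (out, cur); flush cur into out when it fills.
def bStep (width : Int) (s : List (List Int) × List Int) (b : Int) : List (List Int) × List Int :=
  let cur := s.2 ++ [b]
  if (cur.length : Int) = width then (s.1 ++ [cur], ([] : List Int)) else (s.1, cur)

def bits_to_frames_alt (bits : List Int) (width : Int) : List (List Int) :=
  let s := bits.foldl (bStep width) (([] : List (List Int)), ([] : List Int))
  if s.2 = [] then s.1
  else s.1 ++ [s.2 ++ List.replicate (width - (s.2.length : Int)).toNat 0]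

-- ===== PRECONDITION & SPEC =====
-- Pre_ excludes width ≤ 0 with nonempty bits: there the Python A loops forever
-- (i never reaches len(bits)), so A returns on exactly the inputs Pre_ admits.
def Pre_bits_to_frames (bits : List Int) (width : Int) : Prop := 0 < width ∨ bits = []
instance (bits : List Int) (width : Int) : Decidable (Pre_bits_to_frames bits width) := by unfold Pre_bits_to_frames; infer_instance
def pvWitness_bits_to_frames : List Int × Int := ([1, 0, 1, 1, 0], 2)

def Spec_bits_to_frames (bits : List Int) (width : Int) (out : List (List Int)) : Prop := out = bits_to_frames_alt bits width
instance (bits : List Int) (width : Int) (out : List (List Int)) : Decidable (Spec_bits_to_frames bits width out) := by unfold Spec_bits_to_frames; infer_instance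

-- ===== CLAIM (what is proved, stated in full; the proofs are below) =====
def Claim_equal_bits_to_frames : Prop := ∀ (bits : List Int) (width : Int), Dom_bits_to_frames bits width → Pre_bits_to_frames bits width → Spec_bits_to_frames bits width (bits_to_frames bits width)

-- ===== LEMMAS AND PROOFS =====

-- Reference chunker (actual chunk width is w + 1 ≥ 1): take, pad, recurse on the rest.
def chunksP (w : Nat) : List Int → List (List Int)
  | [] => []
  | a :: t =>
      ((a :: t).take (w + 1) ++ List.replicate ((w + 1) - (a :: t).length) 0) ::
        chunksP w ((a :: t).drop (w + 1))
  termination_by l => l.length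
  decreasing_by simp

theorem bitsLoopA_shift (bits : List Int) (width : Int) (hw : 0 < width) :
    ∀ (fuel : Nat) (i : Int), 0 ≤ i →
      bitsLoopA bits width fuel i = bitsLoopA (bits.drop i.toNat) width fuel 0 := by
  intro fuel
  induction fuel generalizing bits with
  | zero => intro i _; rfl
  | succ f ih =>
    intro i hi
    simp only [bitsLoopA]
    have hlen : ((bits.drop i.toNat).length : Int) = (bits.length : Int) - min i.toNat bits.length := by
      simp; omega
    by_cases h : i < (bits.length : Int)
    · have h0 : (0 : Int) < ((bits.drop i.toNat).length : Int) := by rw [hlen]; omega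
      have hslice : PySem.List.slice bits (some i) (some (i + width)) =
          PySem.List.slice (bits.drop i.toNat) (some 0) (some (0 + width)) := by
        rw [PySem.List.slice_toNat _ hi (by omega), PySem.List.slice_toNat _ le_rfl (by omega)]
        simp only [Int.toNat_zero, List.drop_zero, Nat.sub_zero]
        congr 1
        omega
      have hrec : bitsLoopA bits width f (i + width) =
          bitsLoopA (bits.drop i.toNat) width f (0 + width) := by
        rw [ih bits (i + width) (by omega), ih (bits.drop i.toNat) (0 + width) (by omega)]
        rw [List.drop_drop]
        congr 2
        omega
      rw [if_pos h, if_pos h0, hslice, hrec]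
    · rw [if_neg h, if_neg (by rw [hlen]; omega)]

theorem bitsLoopA_eq_chunksP (W : Nat) (hw : 0 < W) :
    ∀ (fuel : Nat) (l : List Int), l.length < fuel →
      bitsLoopA l (W : Int) fuel 0 = chunksP (W - 1) l := by
  intro fuel
  induction fuel with
  | zero => intro l h; omega
  | succ f ih =>
    intro l hlf
    have hW : W - 1 + 1 = W := by omega
    match l with
    | [] => rw [chunksP]; simp [bitsLoopA]
    | a :: t =>
      rw [chunksP, hW]
      simp only [bitsLoopA]
      rw [if_pos (by simp)]
      have hchunk : PySem.List.slice (a :: t) (some 0) (some (0 + (W : Int))) =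
          (a :: t).take W := by
        rw [PySem.List.slice_toNat _ le_rfl (by omega)]
        simp
      have hrec : bitsLoopA (a :: t) (W : Int) f (0 + (W : Int)) =
          chunksP (W - 1) ((a :: t).drop W) := by
        rw [bitsLoopA_shift _ _ (by exact_mod_cast hw) f (0 + (W : Int)) (by omega)]
        rw [ih _ (by have h := hlf; simp at h ⊢; omega)]
        congr 2
        omega
      rw [hchunk, hrec]
      congr 1
      set n := (a :: t).length with hn
      have hlen : ((a :: t).take W).length = min W n := by simp [hn]
      by_cases hcase : (n : Int) < (W : Int)
      · rw [if_pos (by rw [hlen]; push_cast; omega)]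
        congr 2
        rw [hlen]
        push_cast
        omega
      · rw [if_neg (by rw [hlen]; push_cast; omega)]
        have hz : W - n = 0 := by push_cast at hcase; omega
        simp [hz]

-- B-side: the fold never flushes while cur stays shorter than W.
theorem fold_no_flush (W : Nat) :
    ∀ (l : List Int) (out : List (List Int)) (cur : List Int),
      cur.length + l.length < W →
      l.foldl (bStep (W : Int)) (out, cur) = (out, cur ++ l) := by
  intro l
  induction l with
  | nil => intro out cur _; simp
  | cons a t ih =>
    intro out cur h
    simp only [List.foldl_cons, bStep]
    rw [if_neg (by simp at h ⊢; omega)]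
    rw [ih out (cur ++ [a]) (by simp at h ⊢; omega)]
    simp

-- B-side: feeding exactly the elements that complete a frame flushes it.
theorem fold_exact (W : Nat) :
    ∀ (c : List Int) (out : List (List Int)) (cur : List Int),
      c ≠ [] → cur.length + c.length = W →
      c.foldl (bStep (W : Int)) (out, cur) = (out ++ [cur ++ c], ([] : List Int)) := by
  intro c
  induction c with
  | nil => intro _ _ h _; exact absurd rfl h
  | cons a t ih =>
    intro out cur _ h
    simp only [List.foldl_cons, bStep]
    match t with
    | [] =>
      rw [if_pos (by simp at h ⊢; omega)]
      simp
    | b :: t' =>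
      rw [if_neg (by simp at h ⊢; omega)]
      rw [ih out (cur ++ [a]) (by simp) (by simp at h ⊢; omega)]
      simp

-- B-side: the out component only accumulates.
theorem fold_out (W : Nat) :
    ∀ (l : List Int) (out : List (List Int)) (cur : List Int),
      l.foldl (bStep (W : Int)) (out, cur) =
        (out ++ (l.foldl (bStep (W : Int)) ([], cur)).1,
         (l.foldl (bStep (W : Int)) ([], cur)).2) := by
  intro l
  induction l with
  | nil => intro out cur; simp
  | cons a t ih =>
    intro out cur
    simp only [List.foldl_cons, bStep]
    by_cases h : ((cur ++ [a]).length : Int) = (W : Int)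
    · rw [if_pos h, if_pos h, ih (out ++ [cur ++ [a]]) [], ih ([] ++ [cur ++ [a]]) []]
      simp
    · rw [if_neg h, if_neg h, ih out (cur ++ [a]), ih [] (cur ++ [a])]

-- B's fold-then-finalize equals the reference chunker.
theorem alt_eq_chunksP (W : Nat) (hw : 0 < W) :
    ∀ (l : List Int), bits_to_frames_alt l (W : Int) = chunksP (W - 1) l := by
  have hW : W - 1 + 1 = W := by omega
  intro l
  induction hl : l.length using Nat.strong_induction_on generalizing l with
  | _ n ih =>
  subst hl
  match l with
  | [] => rw [chunksP]; simp [bits_to_frames_alt]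
  | a :: t =>
    rw [chunksP, hW]
    by_cases hlt : (a :: t).length < W
    · -- one short frame: the fold never flushes, the tail padding does everything
      have hdrop : (a :: t).drop W = [] := List.drop_eq_nil_of_le (by omega)
      have htake : (a :: t).take W = a :: t := List.take_of_length_le (by omega)
      rw [hdrop, htake, chunksP]
      simp only [bits_to_frames_alt]
      rw [fold_no_flush W (a :: t) [] [] (by simpa using hlt)]
      simp only [List.nil_append]
      rw [if_neg (by simp)]
      congr 3
      omega
    · -- a full first frame is flushed, then the fold continues on the rest
      rw [Nat.not_lt] at hlt
      have hsplit : a :: t = (a :: t).take W ++ (a :: t).drop W := (List.take_append_drop W (a :: t)).symm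
      have htlen : ((a :: t).take W).length = W := by
        simp only [List.length_take]; omega
      have hz : W - (a :: t).length = 0 := by omega
      simp only [bits_to_frames_alt]
      conv_lhs => rw [hsplit]
      rw [List.foldl_append]
      rw [fold_exact W ((a :: t).take W) [] [] (by
            intro hcon; rw [hcon] at htlen; simp at htlen; omega) (by simpa using htlen)]
      simp only [List.nil_append]
      have h1 : (((a :: t).drop W).foldl (bStep (W : Int)) ([(a :: t).take W], [])).1 =
          [(a :: t).take W] ++ (((a :: t).drop W).foldl (bStep (W : Int)) ([], [])).1 := by
        rw [fold_out W ((a :: t).drop W) [(a :: t).take W] []]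
      have h2 : (((a :: t).drop W).foldl (bStep (W : Int)) ([(a :: t).take W], [])).2 =
          (((a :: t).drop W).foldl (bStep (W : Int)) ([], [])).2 := by
        rw [fold_out W ((a :: t).drop W) [(a :: t).take W] []]
      rw [h1, h2, hz]
      simp only [List.replicate_zero, List.append_nil]
      have hihlen : ((a :: t).drop W).length < (a :: t).length := by simp; omega
      have hthis := ih ((a :: t).drop W).length hihlen ((a :: t).drop W) rfl
      simp only [bits_to_frames_alt] at hthis
      rw [← hthis]
      by_cases hc : (((a :: t).drop W).foldl (bStep (W : Int)) ([], [])).2 = []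
      · rw [if_pos hc, if_pos hc]
        simp
      · rw [if_neg hc, if_neg hc]
        simp

-- ===== VERDICT (by name: the statement is the Claim_ definition above) =====
theorem bits_to_frames_spec : Claim_equal_bits_to_frames := by
  intro bits width _ hpre
  unfold Spec_bits_to_frames
  rcases hpre with hw | hb
  · have hwidth : width = (width.toNat : Int) := (Int.toNat_of_nonneg (by omega)).symm
    rw [hwidth, alt_eq_chunksP width.toNat (by omega)]
    unfold bits_to_frames
    exact bitsLoopA_eq_chunksP width.toNat (by omega) _ bits (by omega)
  · subst hb; rfl
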